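-- pv_equiv track=rewrite | github.com/ArunRawat404/DSA | Array/Medium/8. Leaders in Array.py | superiorElements
-- ===== SOURCE A (Python) =====
-- def superiorElements(nums):
--     right = len(nums) - 1
--     ans = []
--
--     max_ele = 0
--
--     while right >= 0:
--         if nums[right] > max_ele:
--             ans.append(nums[right])
--
--         max_ele = max(max_ele, nums[right])
--
--         right -= 1
--
--     return ans
-- ===== SOURCE B (Python) =====
-- def superiorElements(nums):
--     # Two-pass decomposition: build a suffix-max table (0-floored), then
--     # filter the (value, suffix-max) pairs scanning right-to-left.
--     n = len(nums)
--     suf = [0] * n  # suf[i] = max(0, max(nums[i+1:]))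
--     for i in range(n - 2, -1, -1):
--         suf[i] = max(suf[i + 1], nums[i + 1])
--     return [x for x, s in reversed(list(zip(nums, suf))) if x > s]
-- ===== Notes on version B (the rewrite author's own statement) =====
-- stated objective: alternative
-- what changed: Replaces A's single interleaved running-max while-loop with a two-pass decomposition: first build a 0-floored suffix-maximum table, then filter the reversed (value, suffix-max) pairs.
import Mathlib
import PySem

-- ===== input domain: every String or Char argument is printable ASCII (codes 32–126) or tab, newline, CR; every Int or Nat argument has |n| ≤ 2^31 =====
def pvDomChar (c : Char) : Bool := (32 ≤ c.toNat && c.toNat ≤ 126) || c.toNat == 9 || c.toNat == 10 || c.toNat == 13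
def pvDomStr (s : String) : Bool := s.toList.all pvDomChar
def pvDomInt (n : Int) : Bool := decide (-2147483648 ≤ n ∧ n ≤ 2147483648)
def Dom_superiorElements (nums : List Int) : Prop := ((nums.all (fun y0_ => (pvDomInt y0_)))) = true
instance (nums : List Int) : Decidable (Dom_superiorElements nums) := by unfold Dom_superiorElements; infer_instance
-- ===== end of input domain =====

-- B is an alternative two-pass decomposition (suffix-max table, then filter); return values proved equal to A's.

-- ===== PORT A =====
-- A's while loop walks right = n-1 .. 0; the index is always in range, so xs[right]
-- is ported exactly as pyGetD (the default is never used).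
def superiorElements (nums : List Int) : List Int :=
  (((PySem.List.pyRange ((nums.length : Int) - 1) (-1) (-1)).foldl
      (fun (st : List Int × Int) r =>
        (if PySem.List.pyGetD nums r 0 > st.2 then st.1 ++ [PySem.List.pyGetD nums r 0]
         else st.1, max st.2 (PySem.List.pyGetD nums r 0)))
      ([], 0))).1

-- ===== PORT B =====
-- Source B's table loop builds suf right-to-left; the carried Int is suf[i+1]
-- (= max(0, max of the suffix), exactly the value the Python loop reads).
def sufAux (nums : List Int) : List Int × Int :=
  match nums with
  | [] => ([], 0)
  | x :: t =>
    let (s, m) := sufAux t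
    (m :: s, max x m)

def superiorElements_alt (nums : List Int) : List Int :=
  let suf := (sufAux nums).1
  ((((nums.zip suf).filter (fun p => p.1 > p.2)).map Prod.fst)).reverse

-- ===== PRECONDITION & SPEC =====
def Spec_superiorElements (nums : List Int) (out : List Int) : Prop := out = superiorElements_alt nums
instance (nums : List Int) (out : List Int) : Decidable (Spec_superiorElements nums out) := by unfold Spec_superiorElements; infer_instance

-- ===== CLAIM (what is proved, stated in full; the proofs are below) =====
def Claim_equal_superiorElements : Prop := ∀ (nums : List Int), Dom_superiorElements nums → Spec_superiorElements nums (superiorElements nums)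

-- ===== LEMMAS AND PROOFS =====

-- Common recursive characterisation: process the list from the right,
-- carrying (answer-so-far, 0-floored running max).
def aRec (nums : List Int) : List Int × Int :=
  match nums with
  | [] => ([], 0)
  | x :: t =>
    let (a, m) := aRec t
    (if x > m then a ++ [x] else a, max m x)

lemma foldl_rev_eq_aRec (nums : List Int) :
    nums.reverse.foldl
      (fun (st : List Int × Int) v =>
        (if v > st.2 then st.1 ++ [v] else st.1, max st.2 v)) ([], 0) = aRec nums := by
  induction nums with
  | nil => rfl
  | cons x t ih =>
    simp only [List.reverse_cons, List.foldl_append, ih, aRec, List.foldl_cons, List.foldl_nil]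

lemma portA_eq_aRec (nums : List Int) : superiorElements nums = (aRec nums).1 := by
  unfold superiorElements
  rw [PySem.List.pyRange_neg_one_eq_reverse]
  have h1 : ((-1 : Int) + 1) = 0 := by norm_num
  have h2 : ((nums.length : Int) - 1 + 1) = (nums.length : Int) := by ring
  rw [h1, h2]
  have hm := List.foldl_map (f := fun r => PySem.List.pyGetD nums r 0)
    (g := fun (st : List Int × Int) v => (if v > st.2 then st.1 ++ [v] else st.1, max st.2 v))
    (l := (PySem.List.pyRange 0 (nums.length : Int) 1).reverse) (init := ([], 0))
  rw [← hm, List.map_reverse, PySem.List.map_pyGetD_pyRange_zero', foldl_rev_eq_aRec]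

lemma sufAux_snd_eq (nums : List Int) : (sufAux nums).2 = (aRec nums).2 := by
  induction nums with
  | nil => rfl
  | cons x t ih => simp [sufAux, aRec, ih, max_comm]

lemma portB_eq_aRec (nums : List Int) : superiorElements_alt nums = (aRec nums).1 := by
  unfold superiorElements_alt
  induction nums with
  | nil => rfl
  | cons x t ih =>
    simp only [sufAux, aRec]
    rw [show (sufAux t).2 = (aRec t).2 from sufAux_snd_eq t] at *
    by_cases h : x > (aRec t).2 <;>
      simp_all [List.zip_cons_cons]

-- ===== VERDICT (by name: the statement is the Claim_ definition above) =====
theorem superiorElements_spec : Claim_equal_superiorElements := by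
  intro nums _
  unfold Spec_superiorElements
  rw [portA_eq_aRec, portB_eq_aRec]
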